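-- pv_equiv track=rewrite | github.com/ssweber/pyrung | src/pyrung/core/instruction/send_receive.py | _contiguous_runs
-- ===== SOURCE A (Python) =====
-- def _contiguous_runs(addresses: tuple[int, ...]) -> list[tuple[int, int, int]]:
--     runs: list[tuple[int, int, int]] = []
--     run_start_addr = addresses[0]
--     run_start_idx = 0
--     prev_addr = addresses[0]
--
--     for idx, addr in enumerate(addresses[1:], start=1):
--         if addr != prev_addr + 1:
--             runs.append((run_start_addr, run_start_idx, idx))
--             run_start_addr = addr
--             run_start_idx = idx
--         prev_addr = addr
--
--     runs.append((run_start_addr, run_start_idx, len(addresses)))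
--     return runs
-- ===== SOURCE B (Python) =====
-- def _contiguous_runs(addresses):
--     # Group the enumerated pairs by the invariant key addr - idx: the key is
--     # constant exactly within a contiguous run, so each maximal block of
--     # equal-key pairs is one run; emit it from the block's first and last pair.
--     pairs = list(enumerate(addresses))
--     runs = []
--     i, n = 0, len(pairs)
--     while i < n:
--         key = pairs[i][1] - pairs[i][0]
--         j = i + 1
--         while j < n and pairs[j][1] - pairs[j][0] == key:
--             j += 1
--         runs.append((pairs[i][1], pairs[i][0], pairs[j - 1][0] + 1))
--         i = j
--     return runs
-- ===== Notes on version B (the rewrite author's own statement) =====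
-- stated objective: alternative
-- what changed: B groups the enumerated (index, address) pairs by the invariant key address - index (constant exactly within a contiguous run) and emits one run per group from its first and last pair, instead of A's stateful scan carrying prev_addr/run_start accumulators.
import Mathlib
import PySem

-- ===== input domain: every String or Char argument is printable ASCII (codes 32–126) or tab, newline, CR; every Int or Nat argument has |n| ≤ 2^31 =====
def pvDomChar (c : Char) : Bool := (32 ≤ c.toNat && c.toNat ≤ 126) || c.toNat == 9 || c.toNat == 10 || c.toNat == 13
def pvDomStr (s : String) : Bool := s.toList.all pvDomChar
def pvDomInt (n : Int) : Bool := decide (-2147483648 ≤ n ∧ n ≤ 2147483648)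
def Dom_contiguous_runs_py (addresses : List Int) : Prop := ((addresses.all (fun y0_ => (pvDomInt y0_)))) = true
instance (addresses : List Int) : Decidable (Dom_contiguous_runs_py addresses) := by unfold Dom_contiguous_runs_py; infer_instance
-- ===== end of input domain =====

-- B groups the enumerated pairs by the invariant key address - index instead of A's stateful adjacent scan; same O(n) cost, different algorithmic idea. A raises IndexError on the empty tuple (excluded by Pre_), B returns [] there.

-- ===== PORT A =====
-- A's for-loop over enumerate(addresses[1:], start=1), carrying (runs, run_start_addr, run_start_idx, prev_addr); idx is the enumerate counter.
def pvLoopA : List Int → (List (Int × Int × Int) × Int × Int × Int) → Int → (List (Int × Int × Int) × Int × Int × Int)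
  | [], st, _ => st
  | addr :: rest, (runs, rsa, rsi, prev), idx =>
    pvLoopA rest (if addr ≠ prev + 1 then (runs ++ [(rsa, rsi, idx)], addr, idx, addr) else (runs, rsa, rsi, addr)) (idx + 1)

def contiguous_runs_py (addresses : List Int) : List (Int × Int × Int) :=
  match addresses with
  | [] => []  -- addresses[0] raises IndexError in Python; excluded by Pre_
  | a0 :: rest =>
    match pvLoopA rest ([], a0, 0, a0) 1 with
    | (runs, rsa, rsi, _) => runs ++ [(rsa, rsi, (addresses.length : Int))]

-- ===== PORT B =====
-- B's outer while-loop over suffixes of the enumerated pairs, as structural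
-- recursion: the inner while advances j to the end of the maximal equal-key
-- block, i.e. the block is the head plus takeWhile of the key predicate and
-- the next suffix (i = j) is its dropWhile.
def pvGroups : List (Int × Int) → List (List (Int × Int))
  | [] => []
  | x :: xs =>
    (x :: xs.takeWhile (fun y => y.2 - y.1 == x.2 - x.1)) ::
      pvGroups (xs.dropWhile (fun y => y.2 - y.1 == x.2 - x.1))
termination_by l => l.length
decreasing_by
  exact Nat.lt_succ_of_le (List.length_dropWhile_le _ _)

-- pairs[i] / pairs[j-1]: first and last pair of the block (nonempty, so the defaults are never used)
def pvRunOf (g : List (Int × Int)) : Int × Int × Int :=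
  ((g.head?.getD (0, 0)).2, (g.head?.getD (0, 0)).1, (g.getLast?.getD (0, 0)).1 + 1)

def contiguous_runs_py_alt (addresses : List Int) : List (Int × Int × Int) :=
  (pvGroups (PySem.List.enumerate addresses 0)).map pvRunOf

-- ===== PRECONDITION & SPEC =====
-- Pre_ excludes only the empty list, on which A (addresses[0]) raises IndexError.
def Pre_contiguous_runs_py (addresses : List Int) : Prop := addresses ≠ []
instance (addresses : List Int) : Decidable (Pre_contiguous_runs_py addresses) := by unfold Pre_contiguous_runs_py; infer_instance
def pvWitness_contiguous_runs_py : List Int := [3, 4, 7]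

def Spec_contiguous_runs_py (addresses : List Int) (out : List (Int × Int × Int)) : Prop := out = contiguous_runs_py_alt addresses
instance (addresses : List Int) (out : List (Int × Int × Int)) : Decidable (Spec_contiguous_runs_py addresses out) := by unfold Spec_contiguous_runs_py; infer_instance

-- ===== CLAIM (what is proved, stated in full; the proofs are below) =====
def Claim_equal_contiguous_runs_py : Prop := ∀ (addresses : List Int), Dom_contiguous_runs_py addresses → Pre_contiguous_runs_py addresses → Spec_contiguous_runs_py addresses (contiguous_runs_py addresses)

-- ===== LEMMAS AND PROOFS =====

-- the common recursive description both ports reduce to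
def pvRunsSpec (prev rsa rsi idx : Int) : List Int → List (Int × Int × Int)
  | [] => [(rsa, rsi, idx)]
  | x :: xs =>
    if x ≠ prev + 1 then (rsa, rsi, idx) :: pvRunsSpec x x idx (idx + 1) xs
    else pvRunsSpec x rsa rsi (idx + 1) xs

lemma pvLoopA_eq (l : List Int) : ∀ (runs : List (Int × Int × Int)) (rsa rsi prev idx : Int),
    (pvLoopA l (runs, rsa, rsi, prev) idx).1 ++
      [((pvLoopA l (runs, rsa, rsi, prev) idx).2.1,
        (pvLoopA l (runs, rsa, rsi, prev) idx).2.2.1, idx + l.length)] =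
    runs ++ pvRunsSpec prev rsa rsi idx l := by
  induction l with
  | nil => intro runs rsa rsi prev idx; simp [pvLoopA, pvRunsSpec]
  | cons x xs ih =>
    intro runs rsa rsi prev idx
    simp only [pvLoopA]
    have hlen : idx + ((x :: xs).length : Int) = (idx + 1) + (xs.length : Int) := by
      simp only [List.length_cons]; push_cast; ring
    rw [hlen]
    by_cases h : x = prev + 1
    · rw [if_neg (by simp [h]), ih]
      simp [pvRunsSpec, h]
    · rw [if_pos (by simpa using h), ih]
      simp [pvRunsSpec, h]

-- B side: the head group starting at header (rsi, rsa), whose current last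
-- element is (j, a) with the same key, followed by the remaining groups,
-- realises pvRunsSpec.
lemma pvGroups_key (l : List Int) : ∀ (j a rsa rsi : Int), a - j = rsa - rsi →
    (rsa, rsi, ((((j, a) :: (PySem.List.enumerate l (j + 1)).takeWhile
        (fun y => y.2 - y.1 == rsa - rsi)).getLast?.getD (0, 0)).1 + 1))
      :: (pvGroups ((PySem.List.enumerate l (j + 1)).dropWhile
        (fun y => y.2 - y.1 == rsa - rsi))).map pvRunOf
    = pvRunsSpec a rsa rsi (j + 1) l := by
  induction l with
  | nil =>
    intro j a rsa rsi h
    simp [PySem.List.enumerate, pvGroups, pvRunsSpec]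
  | cons x xs ih =>
    intro j a rsa rsi h
    rw [PySem.List.enumerate_cons]
    by_cases hx : x = a + 1
    · -- same key: (j+1, x) joins the head group
      have hk : (x - (j + 1) == rsa - rsi) = true := by
        simp only [beq_iff_eq]; omega
      simp only [List.takeWhile_cons, List.dropWhile_cons, hk, if_true]
      have hIH := ih (j + 1) x rsa rsi (by omega)
      rw [List.getLast?_cons_cons]
      rw [hIH]
      simp [pvRunsSpec, hx]
    · -- key changes: head group ends at (j, a); a new group starts at (j+1, x)
      have hk : (x - (j + 1) == rsa - rsi) = false := by
        simp only [beq_eq_false_iff_ne, ne_eq]; omega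
      simp only [List.takeWhile_cons, List.dropWhile_cons, hk, if_false, Bool.false_eq_true]
      simp only [pvGroups, List.map_cons]
      have hIH := ih (j + 1) x x (j + 1) (by ring)
      simp only [pvRunOf, List.head?_cons, Option.getD_some]
      rw [hIH]
      simp [pvRunsSpec, hx]

-- ===== VERDICT (by name: the statement is the Claim_ definition above) =====
theorem contiguous_runs_py_spec : Claim_equal_contiguous_runs_py := by
  intro addresses _hdom hpre
  unfold Spec_contiguous_runs_py
  cases addresses with
  | nil => exact absurd rfl hpre
  | cons a0 rest =>
    unfold contiguous_runs_py contiguous_runs_py_alt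
    rw [PySem.List.enumerate_cons]
    simp only [pvGroups, List.map_cons]
    simp only [pvRunOf, List.head?_cons, Option.getD_some]
    have hB := pvGroups_key rest 0 a0 a0 0 (by ring)
    rw [hB]
    have hA := pvLoopA_eq rest [] a0 0 a0 1
    simp only [List.nil_append] at hA
    rcases hst : pvLoopA rest ([], a0, 0, a0) 1 with ⟨runs, rsa, rsi, p⟩
    rw [hst] at hA
    simp only [List.length_cons]
    push_cast at hA ⊢
    rw [show (1 : Int) + (rest.length : Int) = (rest.length : Int) + 1 by ring] at hA
    rw [← hA]
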